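-- pv_equiv track=rewrite | github.com/vmordan/klever | bridge/reports/comparison.py | sort_attrs
-- ===== SOURCE A (Python) =====
-- def sort_attrs(attrs: dict, attrs_vals: dict) -> tuple:
--     attrs_selected = list()
--     attrs_others = list()
--     attrs_vals_selected = list()
--     attrs_vals_others = list()
--     for name, compare in sorted(attrs.items()):
--         if compare:
--             attrs_selected.append((name, True))
--             attrs_vals_selected.append((name, attrs_vals[name]))
--         else:
--             attrs_others.append((name, False))
--             attrs_vals_others.append((name, attrs_vals[name]))
--     sorted_attrs = attrs_selected + attrs_others
--     sorted_attrs_vals = attrs_vals_selected + attrs_vals_others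
--     return sorted_attrs, sorted_attrs_vals
-- ===== SOURCE B (Python) =====
-- def sort_attrs(attrs: dict, attrs_vals: dict) -> tuple:
--     ordered = sorted(attrs.items(), key=lambda kv: (not kv[1], kv[0]))
--     sorted_attrs = [(name, bool(compare)) for name, compare in ordered]
--     sorted_attrs_vals = [(name, attrs_vals[name]) for name, compare in ordered]
--     return sorted_attrs, sorted_attrs_vals
-- ===== Notes on version B (the rewrite author's own statement) =====
-- stated objective: simpler
-- what changed: Replaces the four accumulator lists and the partition-then-concatenate loop by one sort with the composite key (not compare, name) followed by two straight map passes.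
import Mathlib
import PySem

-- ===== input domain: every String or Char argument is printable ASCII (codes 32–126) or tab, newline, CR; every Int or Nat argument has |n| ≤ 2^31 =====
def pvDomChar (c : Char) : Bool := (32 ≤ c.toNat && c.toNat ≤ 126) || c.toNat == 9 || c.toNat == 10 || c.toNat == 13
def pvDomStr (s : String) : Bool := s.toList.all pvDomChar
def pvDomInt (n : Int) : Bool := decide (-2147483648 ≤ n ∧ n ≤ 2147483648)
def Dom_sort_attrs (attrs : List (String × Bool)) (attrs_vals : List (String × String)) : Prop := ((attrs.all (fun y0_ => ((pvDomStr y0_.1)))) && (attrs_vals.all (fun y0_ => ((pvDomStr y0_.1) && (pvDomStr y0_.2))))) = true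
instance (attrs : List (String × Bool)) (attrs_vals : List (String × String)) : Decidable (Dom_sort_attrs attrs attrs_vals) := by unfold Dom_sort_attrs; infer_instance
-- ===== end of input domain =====

-- B replaces A's partition-into-four-lists loop by ONE sort with the composite key (not compare, name) plus two map passes (objective: simpler).

-- ===== PORT A =====
-- literal port: dicts become PySem.Dict built from the association lists; sorted(attrs.items())
-- sorts pairs by (name, compare); attrs_vals[name] is getD (KeyError inputs are excluded by Pre_).
def sort_attrs (attrs : List (String × Bool)) (attrs_vals : List (String × String)) : (List (String × Bool)) × (List (String × String)) :=
  let da := PySem.Dict.ofList attrs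
  let dv := PySem.Dict.ofList attrs_vals
  let r := (PySem.List.sorted2 da.items (fun kv => kv.1) (fun kv => kv.2)).foldl
    (fun (acc : List (String × Bool) × List (String × String) × List (String × Bool) × List (String × String)) kv =>
      if kv.2 then
        (acc.1 ++ [(kv.1, true)], acc.2.1 ++ [(kv.1, dv.getD kv.1 "")], acc.2.2.1, acc.2.2.2)
      else
        (acc.1, acc.2.1, acc.2.2.1 ++ [(kv.1, false)], acc.2.2.2 ++ [(kv.1, dv.getD kv.1 "")]))
    ([], [], [], [])
  (r.1 ++ r.2.2.1, r.2.1 ++ r.2.2.2)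

-- ===== PORT B =====
def sort_attrs_alt (attrs : List (String × Bool)) (attrs_vals : List (String × String)) : (List (String × Bool)) × (List (String × String)) :=
  let da := PySem.Dict.ofList attrs
  let dv := PySem.Dict.ofList attrs_vals
  let ordered := PySem.List.sorted2 da.items (fun kv => !kv.2) (fun kv => kv.1)
  (ordered.map (fun kv => (kv.1, kv.2)), ordered.map (fun kv => (kv.1, dv.getD kv.1 "")))

-- ===== PRECONDITION & SPEC =====
-- Pre_ excludes exactly the inputs where some attribute name is missing from attrs_vals, on which A raises KeyError.
def Pre_sort_attrs (attrs : List (String × Bool)) (attrs_vals : List (String × String)) : Prop :=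
  ∀ p ∈ attrs, p.1 ∈ attrs_vals.map Prod.fst
instance (attrs : List (String × Bool)) (attrs_vals : List (String × String)) : Decidable (Pre_sort_attrs attrs attrs_vals) := by unfold Pre_sort_attrs; infer_instance
def pvWitness_sort_attrs : (List (String × Bool)) × (List (String × String)) :=
  ([("b", false), ("a", true)], [("a", "x"), ("b", "y")])
def Spec_sort_attrs (attrs : List (String × Bool)) (attrs_vals : List (String × String)) (out : (List (String × Bool)) × (List (String × String))) : Prop := out = sort_attrs_alt attrs attrs_vals
instance (attrs : List (String × Bool)) (attrs_vals : List (String × String)) (out : (List (String × Bool)) × (List (String × String))) : Decidable (Spec_sort_attrs attrs attrs_vals out) := by unfold Spec_sort_attrs; infer_instance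

-- ===== CLAIM (what is proved, stated in full; the proofs are below) =====
def Claim_equal_sort_attrs : Prop := ∀ (attrs : List (String × Bool)) (attrs_vals : List (String × String)), Dom_sort_attrs attrs attrs_vals → Pre_sort_attrs attrs attrs_vals → Spec_sort_attrs attrs attrs_vals (sort_attrs attrs attrs_vals)

-- ===== LEMMAS AND PROOFS =====

theorem pv_insertBy_congr {α : Type} (before before' : α → α → Bool) (x : α) (ys : List α)
    (h : ∀ y ∈ ys, before x y = before' x y) :
    PySem.List.insertBy before x ys = PySem.List.insertBy before' x ys := by
  induction ys with
  | nil => rfl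
  | cons y ys ih =>
    simp only [PySem.List.insertBy]
    rw [h y (List.mem_cons_self ..)]
    by_cases hb : before' x y = true
    · simp [hb]
    · simp only [hb, Bool.false_eq_true, if_false]
      rw [ih (fun z hz => h z (List.mem_cons_of_mem _ hz))]

theorem pv_foldl_insertBy_congr {α : Type} (s : List α) (before before' : α → α → Bool)
    (h : ∀ a ∈ s, ∀ b ∈ s, before a b = before' a b) :
    ∀ (xs acc : List α), (∀ a ∈ xs, a ∈ s) → (∀ a ∈ acc, a ∈ s) →
      xs.foldl (fun a x => PySem.List.insertBy before x a) acc
        = xs.foldl (fun a x => PySem.List.insertBy before' x a) acc := by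
  intro xs
  induction xs with
  | nil => intro acc _ _; rfl
  | cons x xs ih =>
    intro acc hxs hacc
    have hx : x ∈ s := hxs x (List.mem_cons_self ..)
    simp only [List.foldl_cons]
    rw [pv_insertBy_congr before before' x acc (fun y hy => h x hx y (hacc y hy))]
    exact ih _ (fun a ha => hxs a (List.mem_cons_of_mem _ ha))
      (fun a ha => by
        rcases (PySem.List.mem_insertBy ..).mp ha with h' | h'
        · exact h' ▸ hx
        · exact hacc a h')

-- encoding of B's composite key (not compare, name) as a single String key
def pvEnc (p : String × Bool) : String := String.ofList ((if p.2 then '0' else '1') :: p.1.toList)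

theorem pv_string_ofList_lt (s t : List Char) : (String.ofList s < String.ofList t) ↔ s < t := by
  simp

theorem pv_enc_lt_same (p q : String × Bool) (h : p.2 = q.2) :
    (pvEnc p < pvEnc q) ↔ p.1 < q.1 := by
  by_cases hq : q.2 = true
  · have hp : p.2 = true := h.trans hq
    simp only [pvEnc, hp, hq, if_true]
    rw [pv_string_ofList_lt, List.cons_lt_cons_iff]
    simp
  · simp only [Bool.not_eq_true] at hq
    have hp : p.2 = false := h.trans hq
    simp only [pvEnc, hp, hq, Bool.false_eq_true, if_false]
    rw [pv_string_ofList_lt, List.cons_lt_cons_iff]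
    simp

theorem pv_enc_lt_tf (p q : String × Bool) (hp : p.2 = true) (hq : q.2 = false) :
    pvEnc p < pvEnc q := by
  simp only [pvEnc, hp, hq, if_true, Bool.false_eq_true, if_false]
  rw [pv_string_ofList_lt, List.cons_lt_cons_iff]
  exact Or.inl (by decide)

theorem pv_not_enc_lt_ft (p q : String × Bool) (hp : p.2 = false) (hq : q.2 = true) :
    ¬ pvEnc p < pvEnc q := by
  simp only [pvEnc, hp, hq, if_true, Bool.false_eq_true, if_false]
  rw [pv_string_ofList_lt, List.cons_lt_cons_iff]
  rintro (h | ⟨h, -⟩)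
  · exact absurd h (by decide)
  · exact absurd h (by decide)

-- B's sort with composite key = sort with the single String key pvEnc
theorem pv_sortB_eq_sorted_enc (L : List (String × Bool)) :
    PySem.List.sorted2 L (fun kv => !kv.2) (fun kv => kv.1)
      = PySem.List.sorted L pvEnc := by
  show L.foldl (fun a x => PySem.List.insertBy _ x a) [] = L.foldl (fun a x => PySem.List.insertBy _ x a) []
  refine pv_foldl_insertBy_congr L _ _ (fun a _ b _ => ?_) L [] (fun a ha => ha) (fun a ha => absurd ha (List.not_mem_nil))
  cases hpa : a.2 <;> cases hpb : b.2
  · simp [hpa, hpb, pv_enc_lt_same a b (by rw [hpa, hpb])]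
  · simp [hpa, hpb, pv_not_enc_lt_ft a b hpa hpb]
  · simp [hpa, hpb, pv_enc_lt_tf a b hpa hpb]
  · simp [hpa, hpb, pv_enc_lt_same a b (by rw [hpa, hpb])]

-- A's tuple sort = sort by name alone, when names are distinct
theorem pv_sortA_eq_sorted_fst (L : List (String × Bool)) (hnd : (L.map Prod.fst).Nodup) :
    PySem.List.sorted2 L (fun kv => kv.1) (fun kv => kv.2)
      = PySem.List.sorted L (fun kv => kv.1) := by
  have hinj : ∀ a ∈ L, ∀ b ∈ L, a.1 = b.1 → a = b := fun a ha b hb h =>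
    List.inj_on_of_nodup_map hnd ha hb h
  show L.foldl (fun a x => PySem.List.insertBy _ x a) [] = L.foldl (fun a x => PySem.List.insertBy _ x a) []
  refine pv_foldl_insertBy_congr L _ _ (fun a ha b hb => ?_) L [] (fun a ha => ha) (fun a ha => absurd ha (List.not_mem_nil))
  by_cases h1 : a.1 < b.1
  · simp [h1]
  · by_cases h2 : b.1 < a.1
    · simp [h1, h2]
    · have : a = b := hinj a ha b hb (le_antisymm (not_lt.mp h2) (not_lt.mp h1))
      subst this
      simp [h1, h2]

theorem pv_map_filter_true (L : List (String × Bool)) :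
    (L.filter (fun p => p.2)).map (fun p => (p.1, true)) = L.filter (fun p => p.2) := by
  induction L with
  | nil => rfl
  | cons x xs ih =>
    by_cases hx : x.2
    · simp [hx, ih, Prod.ext_iff]
    · simp only [Bool.not_eq_true] at hx
      simp [hx, ih]

theorem pv_map_filter_false (L : List (String × Bool)) :
    (L.filter (fun p => !p.2)).map (fun p => (p.1, false)) = L.filter (fun p => !p.2) := by
  induction L with
  | nil => rfl
  | cons x xs ih =>
    by_cases hx : x.2
    · simp [hx, ih]
    · simp only [Bool.not_eq_true] at hx
      simp [hx, ih, Prod.ext_iff]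

-- A's loop, characterised: the four accumulators are the filters, mapped
theorem pv_foldA (dv : PySem.Dict String String) (L : List (String × Bool))
    (sel oth : List (String × Bool)) (vsel voth : List (String × String)) :
    L.foldl
      (fun (acc : List (String × Bool) × List (String × String) × List (String × Bool) × List (String × String)) kv =>
        if kv.2 then
          (acc.1 ++ [(kv.1, true)], acc.2.1 ++ [(kv.1, dv.getD kv.1 "")], acc.2.2.1, acc.2.2.2)
        else
          (acc.1, acc.2.1, acc.2.2.1 ++ [(kv.1, false)], acc.2.2.2 ++ [(kv.1, dv.getD kv.1 "")]))
      (sel, vsel, oth, voth)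
      = (sel ++ (L.filter (fun p => p.2)).map (fun p => (p.1, true)),
         vsel ++ (L.filter (fun p => p.2)).map (fun p => (p.1, dv.getD p.1 "")),
         oth ++ (L.filter (fun p => !p.2)).map (fun p => (p.1, false)),
         voth ++ (L.filter (fun p => !p.2)).map (fun p => (p.1, dv.getD p.1 ""))) := by
  induction L generalizing sel oth vsel voth with
  | nil => simp
  | cons x xs ih =>
    by_cases hx : x.2
    · simp [List.filter_cons, hx, ih, List.append_assoc]
    · simp only [Bool.not_eq_true] at hx
      simp [List.filter_cons, hx, ih, List.append_assoc]

-- the sorted-by-name list has strictly increasing, hence pvEnc-sortable, structure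
theorem pv_main (L : List (String × Bool)) (hnd : (L.map Prod.fst).Nodup) :
    PySem.List.sorted L pvEnc
      = (PySem.List.sorted L (fun kv => kv.1)).filter (fun p => p.2)
        ++ (PySem.List.sorted L (fun kv => kv.1)).filter (fun p => !p.2) := by
  set S := PySem.List.sorted L (fun kv => kv.1) with hS
  have hperm : (S.filter (fun p => p.2) ++ S.filter (fun p => !p.2)).Perm L :=
    (List.filter_append_perm _ S).trans (PySem.List.sorted_perm ..)
  have hSperm : S.Perm L := PySem.List.sorted_perm ..
  have hSnd : (S.map Prod.fst).Nodup := ((hSperm.map Prod.fst).nodup_iff).mpr hnd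
  have hle : S.Pairwise (fun a b => a.1 ≤ b.1) := PySem.List.sorted_pairwise ..
  have hne : S.Pairwise (fun a b => a.1 ≠ b.1) := List.pairwise_map.mp hSnd
  have hlt : S.Pairwise (fun a b => a.1 < b.1) :=
    (hle.and hne).imp (fun h => lt_of_le_of_ne h.1 h.2)
  refine PySem.List.sorted_eq_of_perm_of_pairwise_lt _ _ _ hperm ?_
  rw [List.pairwise_append]
  refine ⟨?_, ?_, ?_⟩
  · have := (hlt.filter (fun p => p.2))
    refine this.imp_of_mem (fun {a b} ha hb h => ?_)
    have ha2 := List.of_mem_filter ha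
    have hb2 := List.of_mem_filter hb
    exact (pv_enc_lt_same a b (by rw [ha2, hb2])).mpr h
  · have := (hlt.filter (fun p => !p.2))
    refine this.imp_of_mem (fun {a b} ha hb h => ?_)
    have ha2 := List.of_mem_filter ha
    have hb2 := List.of_mem_filter hb
    simp only [Bool.not_eq_true'] at ha2 hb2
    exact (pv_enc_lt_same a b (by rw [ha2, hb2])).mpr h
  · intro a ha b hb
    exact pv_enc_lt_tf a b (List.of_mem_filter ha) (by simpa using List.of_mem_filter hb)

-- ===== VERDICT (by name: the statement is the Claim_ definition above) =====
theorem sort_attrs_spec : Claim_equal_sort_attrs := by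
  intro attrs attrs_vals _ _
  show sort_attrs attrs attrs_vals = sort_attrs_alt attrs attrs_vals
  unfold sort_attrs sort_attrs_alt
  dsimp only
  have hnd : (((PySem.Dict.ofList attrs).items).map Prod.fst).Nodup :=
    PySem.Dict.nodup_keys_ofList attrs
  rw [pv_sortA_eq_sorted_fst _ hnd, pv_sortB_eq_sorted_enc, pv_main _ hnd, pv_foldA]
  simp only [List.nil_append, List.map_append]
  rw [pv_map_filter_true, pv_map_filter_false]
  simp [Prod.mk.eta]
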